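-- pv_equiv track=rewrite | github.com/siddharth1199/aoc_2017 | optum_aoc/2017/day04/a.py | check_anagrams
-- ===== SOURCE A (Python) =====
-- def check_anagrams(list_words):
--     """ check if list of words contain any two words that are anagrams
--     we just do sort of all words before comparison
--     note this still catches duplicates, as duplicates are anagrams """
--     sorted_list_words = []
--     for word in list_words:
--         sorted_list_words.append(''.join(sorted(word)))
--     set_sorted_words = set(sorted_list_words)
--     if len(set_sorted_words) == len(list_words):
--         return True
--     else:
--         return False
-- ===== SOURCE B (Python) =====
-- def check_anagrams(list_words):
--     """Pairwise scan: compare each word's sorted letters against every later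
--     word's; return False on the first anagram pair, True if none exists."""
--     rest = list_words
--     while rest:
--         w, rest = rest[0], rest[1:]
--         for v in rest:
--             if sorted(w) == sorted(v):
--                 return False
--     return True
-- ===== Notes on version B (the rewrite author's own statement) =====
-- stated objective: alternative
-- what changed: Replaces the normalize-all-then-compare-set-size strategy with a direct pairwise scan that compares sorted letters of each word with each later word and returns False at the first anagram pair, keeping no auxiliary set or list.
import Mathlib
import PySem

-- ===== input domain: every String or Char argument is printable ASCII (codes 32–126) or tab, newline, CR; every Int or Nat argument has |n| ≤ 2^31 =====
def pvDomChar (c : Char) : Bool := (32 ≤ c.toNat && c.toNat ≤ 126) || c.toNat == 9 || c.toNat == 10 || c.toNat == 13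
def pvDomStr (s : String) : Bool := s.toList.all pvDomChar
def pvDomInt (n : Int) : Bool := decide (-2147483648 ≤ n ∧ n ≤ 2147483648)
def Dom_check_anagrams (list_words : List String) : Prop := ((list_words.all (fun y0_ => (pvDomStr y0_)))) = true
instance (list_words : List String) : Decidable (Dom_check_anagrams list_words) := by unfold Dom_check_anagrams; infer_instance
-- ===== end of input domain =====

-- B replaces A's normalize-all-then-compare-set-sizes pass with a direct pairwise
-- scan over sorted letters (alternative decomposition, not claimed faster).


-- ===== PORT A =====
-- ''.join(sorted(word)): sort the characters and rebuild the string (exact: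
-- Python sorts the word's one-character strings, which orders the same as the
-- characters themselves).
def pvNorm (w : String) : String := String.ofList (PySem.List.sorted w.toList (fun c => c) false)

def check_anagrams (list_words : List String) : Bool :=
  let sorted_list_words : List String :=
    list_words.foldl (fun acc word => acc ++ [pvNorm word]) []
  let set_sorted_words : PySem.Set String := PySem.Set.ofList sorted_list_words
  if PySem.Set.len set_sorted_words = (list_words.length : Int) then true else false

-- ===== PORT B =====
-- 'while rest: w, rest = rest[0], rest[1:]' is the structural recursion below;
-- the inner 'for v in rest: if sorted(w) == sorted(v): return False' is the any.
def check_anagrams_alt (list_words : List String) : Bool :=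
  match list_words with
  | [] => true
  | w :: rest =>
      if rest.any (fun v => PySem.List.sorted w.toList (fun c => c) false
                              == PySem.List.sorted v.toList (fun c => c) false)
      then false
      else check_anagrams_alt rest

-- ===== PRECONDITION & SPEC =====
def Spec_check_anagrams (list_words : List String) (out : Bool) : Prop := out = check_anagrams_alt list_words
instance (list_words : List String) (out : Bool) : Decidable (Spec_check_anagrams list_words out) := by unfold Spec_check_anagrams; infer_instance

-- ===== CLAIM (what is proved, stated in full; the proofs are below) =====
def Claim_equal_check_anagrams : Prop := ∀ (list_words : List String), Dom_check_anagrams list_words → Spec_check_anagrams list_words (check_anagrams list_words)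

-- ===== LEMMAS AND PROOFS =====

-- Both sides reduce to: the list of normalized words has no duplicates.
theorem pvOfList_len (xs : List String) :
    (PySem.Set.ofList xs).length = xs.length ↔ xs.Nodup := by
  have hfin : (PySem.Set.ofList xs).toFinset = xs.toFinset := by
    ext x; simp [List.mem_toFinset, PySem.Set.mem_ofList]
  have h1 : (PySem.Set.ofList xs).length = xs.dedup.length := by
    rw [← List.toFinset_card_of_nodup (PySem.Set.nodup_ofList xs), hfin, List.card_toFinset]
  rw [h1]
  constructor
  · intro h
    exact List.dedup_eq_self.mp ((xs.dedup_sublist).eq_of_length h)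
  · intro h; rw [List.dedup_eq_self.mpr h]

theorem pvAlt_iff (l : List String) :
    check_anagrams_alt l = true ↔ (l.map pvNorm).Nodup := by
  induction l with
  | nil => simp [check_anagrams_alt]
  | cons w rest ih =>
    simp only [check_anagrams_alt, List.map_cons, List.nodup_cons]
    by_cases h : rest.any (fun v => PySem.List.sorted w.toList (fun c => c) false
                              == PySem.List.sorted v.toList (fun c => c) false)
    · simp only [h, if_true]
      constructor
      · intro hf; exact absurd hf (by simp)
      · rintro ⟨hnm, _⟩
        obtain ⟨v, hv, he⟩ := List.any_eq_true.mp h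
        exact absurd (List.mem_map.mpr ⟨v, hv, by
          unfold pvNorm; exact congrArg String.ofList (beq_iff_eq.mp he).symm⟩) hnm
    · simp only [h, if_false, Bool.false_eq_true]
      rw [ih]
      constructor
      · intro hn
        refine ⟨?_, hn⟩
        intro hm
        obtain ⟨v, hv, he⟩ := List.mem_map.mp hm
        apply h
        refine List.any_eq_true.mpr ⟨v, hv, beq_iff_eq.mpr ?_⟩
        have h2 : pvNorm v = pvNorm w := he
        have h3 := congrArg String.toList h2
        simpa [pvNorm, String.toList_ofList] using h3.symm
      · exact fun ⟨_, hn⟩ => hn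

theorem pvFold_append (l : List String) :
    l.foldl (fun acc word => acc ++ [pvNorm word]) [] = l.map pvNorm := by
  have h : ∀ acc, l.foldl (fun acc word => acc ++ [pvNorm word]) acc = acc ++ l.map pvNorm := by
    induction l with
    | nil => intro acc; simp
    | cons x xs ih => intro acc; simp [List.foldl, ih]
  simpa using h []

theorem pvA_iff (l : List String) :
    check_anagrams l = true ↔ (l.map pvNorm).Nodup := by
  unfold check_anagrams
  rw [pvFold_append]
  show (if PySem.Set.len (PySem.Set.ofList (l.map pvNorm)) = (l.length : Int) then true else false) = true ↔ (l.map pvNorm).Nodup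
  have hlen : PySem.Set.len (PySem.Set.ofList (l.map pvNorm))
      = ((PySem.Set.ofList (l.map pvNorm)).length : Int) := by
    simp [PySem.Set.len]
  rw [hlen]
  by_cases h : ((PySem.Set.ofList (l.map pvNorm)).length : Int) = (l.length : Int)
  · simp only [h, if_true]
    have : (PySem.Set.ofList (l.map pvNorm)).length = (l.map pvNorm).length := by
      simpa using Int.natCast_inj.mp h
    simp [(pvOfList_len _).mp this]
  · simp only [h, if_false]
    constructor
    · intro hf; exact absurd hf (by simp)
    · intro hn
      exact absurd (by rw [(pvOfList_len _).mpr hn]; simp) h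

-- ===== VERDICT (by name: the statement is the Claim_ definition above) =====
theorem check_anagrams_spec : Claim_equal_check_anagrams := by
  intro l _
  unfold Spec_check_anagrams
  have ha := pvA_iff l
  have hb := pvAlt_iff l
  cases h1 : check_anagrams l <;> cases h2 : check_anagrams_alt l <;> simp_all
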